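-- pv_equiv track=rewrite | github.com/cmillstead/ironmunch | src/codesight_mcp/parser/graph.py | _build_import_resolution_map
-- ===== SOURCE A (Python) =====
-- from collections import defaultdict, deque
--
-- _DOTTED_IMPORT_EXTENSIONS: frozenset[str] = frozenset({
--     ".py", ".java", ".kt", ".kts", ".scala", ".groovy",
--     ".clj", ".cljs", ".cljc",  # Clojure
--     ".ex", ".exs",  # Elixir
--     ".erl", ".hrl",  # Erlang
--     ".jl",  # Julia
-- })
--
-- def _build_import_resolution_map(source_files: list[str]) -> dict[str, str | None]:
--     """Build a multi-key lookup mapping import strings to source file paths.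
--
--     For each source file, generates up to four match keys:
--     - Original path: the full file path (Foo.h -> Foo.h, for C-family #include)
--     - Full path stem: strip extension (pkg/utils.py -> pkg/utils)
--     - Dotted form: replace / with . in stem (pkg/utils -> pkg.utils)
--       — only for languages that use dotted module imports
--     - Basename: filename without extension (utils)
--
--     Keys that map to multiple files are marked as ambiguous (None).
--     Returns dict mapping key -> file_path (unambiguous) or key -> None (ambiguous).
--     """
--     key_to_files: dict[str, list[str]] = defaultdict(list)
--
--     for f in source_files:
--         stem = f.rsplit(".", 1)[0] if "." in f else f
--         ext = f[f.rfind("."):] if "." in f else ""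
--         basename = stem.rsplit("/", 1)[-1] if "/" in stem else stem
--
--         # Include the original path so C-family #include "Foo.h" resolves
--         keys = [f, stem, basename]
--         # Only add dotted form for languages that use dotted module imports
--         if ext in _DOTTED_IMPORT_EXTENSIONS:
--             keys.append(stem.replace("/", "."))
--         for key in keys:
--             key_to_files[key].append(f)
--
--     # Resolve: single file = unambiguous, multiple = ambiguous (None)
--     result: dict[str, str | None] = {}
--     for key, files in key_to_files.items():
--         unique = list(set(files))
--         result[key] = unique[0] if len(unique) == 1 else None
--
--     return result
-- ===== SOURCE B (Python) =====
-- _DOTTED_IMPORT_EXTENSIONS: frozenset[str] = frozenset({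
--     ".py", ".java", ".kt", ".kts", ".scala", ".groovy",
--     ".clj", ".cljs", ".cljc",
--     ".ex", ".exs",
--     ".erl", ".hrl",
--     ".jl",
-- })
--
-- def _build_import_resolution_map(source_files: list[str]) -> dict[str, str | None]:
--     """One-pass variant: stream keys straight into the final map, resolving
--     ambiguity on the fly instead of building an index and re-scanning it."""
--     result: dict[str, str | None] = {}
--     for f in source_files:
--         stem = f.rsplit(".", 1)[0] if "." in f else f
--         ext = f[f.rfind("."):] if "." in f else ""
--         basename = stem.rsplit("/", 1)[-1] if "/" in stem else stem
--         keys = [f, stem, basename]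
--         if ext in _DOTTED_IMPORT_EXTENSIONS:
--             keys.append(stem.replace("/", "."))
--         for key in keys:
--             if key not in result:
--                 result[key] = f
--             elif result[key] is not None and result[key] != f:
--                 result[key] = None
--     return result
-- ===== Notes on version B (the rewrite author's own statement) =====
-- stated objective: simpler
-- what changed: Replaced A's two-phase shape (build a defaultdict index key->list of files, then a second loop that deduplicates each list via set() to resolve ambiguity) with a single pass that streams each key straight into the final dict, storing the file on first sight and demoting a key to None when a different file hits it.
import Mathlib
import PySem

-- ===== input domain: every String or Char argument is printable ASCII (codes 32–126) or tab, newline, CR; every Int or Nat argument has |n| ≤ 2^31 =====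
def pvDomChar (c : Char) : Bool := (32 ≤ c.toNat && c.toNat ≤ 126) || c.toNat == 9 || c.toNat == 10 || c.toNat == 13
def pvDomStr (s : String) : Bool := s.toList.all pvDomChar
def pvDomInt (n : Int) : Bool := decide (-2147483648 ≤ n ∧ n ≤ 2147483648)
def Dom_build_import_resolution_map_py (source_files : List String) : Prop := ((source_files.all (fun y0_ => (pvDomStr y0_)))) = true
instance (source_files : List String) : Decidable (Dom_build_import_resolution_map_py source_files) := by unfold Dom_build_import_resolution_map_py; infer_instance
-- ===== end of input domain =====

-- B replaces A's build-index-then-rescan (defaultdict of file lists + a second resolution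
-- loop) by ONE pass that streams each key straight into the final map, resolving ambiguity
-- on the fly (objective: simpler — the intermediate index and the second loop disappear).

-- ===== PORT A =====
-- _DOTTED_IMPORT_EXTENSIONS (a frozenset literal)
def pyDottedExts : PySem.Set String :=
  PySem.Set.ofList [".py", ".java", ".kt", ".kts", ".scala", ".groovy",
    ".clj", ".cljs", ".cljc", ".ex", ".exs", ".erl", ".hrl", ".jl"]

-- the per-file key generation, identical lines in both Pythons (stem / ext / basename / keys).
-- rsplit(sep, 1) under the "sep in s" guard is ported exactly as slicing at s.rfind(sep):
-- s.rsplit(".", 1)[0] = s[:s.rfind(".")], stem.rsplit("/", 1)[-1] = stem[stem.rfind("/")+1:].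
def importKeys (f : String) : List String :=
  let stem := if PySem.Str.isIn "." f then PySem.Str.slice f none (some (PySem.Str.rfind f ".")) else f
  let ext := if PySem.Str.isIn "." f then PySem.Str.slice f (some (PySem.Str.rfind f ".")) none else ""
  let basename := if PySem.Str.isIn "/" stem then PySem.Str.slice stem (some (PySem.Str.rfind stem "/" + 1)) none else stem
  let keys := [f, stem, basename]
  if PySem.Set.contains pyDottedExts ext then keys ++ [PySem.Str.replace stem "/" "."] else keys

-- body of A's second loop: unique = list(set(files)); unique[0] if len(unique) == 1 else None
def pyResolve (files : List String) : Option String :=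
  let unique := PySem.Set.ofList files
  if unique.length = 1 then PySem.List.pyGet? unique 0 else none

def build_import_resolution_map_py (source_files : List String) : List (String × Option String) :=
  let key_to_files : PySem.Dict String (List String) :=
    source_files.foldl (fun d f =>
      (importKeys f).foldl (fun d key => d.insert key (d.getD key [] ++ [f])) d)
      PySem.Dict.empty
  (key_to_files.items.foldl
    (fun (r : PySem.Dict String (Option String)) kv => r.insert kv.1 (pyResolve kv.2))
    PySem.Dict.empty).items

-- ===== PORT B =====
-- body of B's inner loop: absent key -> store f; stored a different file -> mark None; else keep
def bStep (r : PySem.Dict String (Option String)) (f key : String) : PySem.Dict String (Option String) :=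
  match r.get? key with
  | none => r.insert key (some f)
  | some v => if v ≠ none ∧ v ≠ some f then r.insert key none else r

def build_import_resolution_map_py_alt (source_files : List String) : List (String × Option String) :=
  (source_files.foldl
    (fun r f => (importKeys f).foldl (fun r key => bStep r f key) r)
    PySem.Dict.empty).items

-- ===== PRECONDITION & SPEC =====
def Spec_build_import_resolution_map_py (source_files : List String) (out : List (String × Option String)) : Prop := out = build_import_resolution_map_py_alt source_files
instance (source_files : List String) (out : List (String × Option String)) : Decidable (Spec_build_import_resolution_map_py source_files out) := by unfold Spec_build_import_resolution_map_py; infer_instance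

-- ===== CLAIM (what is proved, stated in full; the proofs are below) =====
def Claim_equal_build_import_resolution_map_py : Prop := ∀ (source_files : List String), Dom_build_import_resolution_map_py source_files → Spec_build_import_resolution_map_py source_files (build_import_resolution_map_py source_files)

-- ===== LEMMAS AND PROOFS =====

-- A's index entry (key, fs), resolved, is exactly what B stores at key.
def mapRes (l : List (String × List String)) : List (String × Option String) :=
  l.map (fun p => (p.1, pyResolve p.2))

def ABInv (d : PySem.Dict String (List String)) (r : PySem.Dict String (Option String)) : Prop :=
  r.items = mapRes d.items ∧ d.keys.Nodup ∧ ∀ p ∈ d.items, p.2 ≠ []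

theorem pyResolve_singleton (f : String) : pyResolve [f] = some f := by
  simp [pyResolve, PySem.Set.ofList, PySem.Set.add, PySem.Set.empty, PySem.Set.contains,
    PySem.List.pyGet?, PySem.List.pyIdx?]

theorem pyResolve_snoc (fs : List String) (f : String) (h : fs ≠ []) :
    pyResolve (fs ++ [f]) =
      if pyResolve fs ≠ none ∧ pyResolve fs ≠ some f then none else pyResolve fs := by
  simp only [pyResolve, PySem.Set.ofList_append_singleton, PySem.Set.add_eq_ite]
  cases hu : PySem.Set.ofList fs with
  | nil =>
    obtain ⟨x, hx⟩ := List.exists_mem_of_ne_nil fs h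
    have hx' := (PySem.Set.mem_ofList fs x).2 hx
    rw [hu] at hx'; simp at hx'
  | cons g t =>
    cases t with
    | nil =>
      by_cases hf : f = g
      · subst hf; simp [PySem.List.pyGet?, PySem.List.pyIdx?]
      · simp [hf, Ne.symm hf, PySem.List.pyGet?, PySem.List.pyIdx?]
    | cons b t' =>
      by_cases hf : f ∈ g :: b :: t' <;> simp [hf]

theorem get?_mapRes (l : List (String × List String)) (k : String) :
    (PySem.Dict.mk (mapRes l)).get? k = ((PySem.Dict.mk l).get? k).map pyResolve := by
  induction l with
  | nil => rfl
  | cons p l ih =>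
    have e1 : mapRes (p :: l) = (p.1, pyResolve p.2) :: mapRes l := rfl
    rw [e1, PySem.Dict.get?_mk_cons, PySem.Dict.get?_mk_cons]
    by_cases hp : p.1 = k <;> simp [hp, ih]

theorem step_inv (d : PySem.Dict String (List String)) (r : PySem.Dict String (Option String))
    (f key : String) (h : ABInv d r) :
    ABInv (d.insert key (d.getD key [] ++ [f])) (bStep r f key) := by
  obtain ⟨hmap, hnd, hne⟩ := h
  have hget : r.get? key = (d.get? key).map pyResolve := by
    have hr : r = PySem.Dict.mk (mapRes d.items) := PySem.Dict.ext hmap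
    rw [hr]; exact get?_mapRes d.items key
  cases hd0 : d.get? key with
  | none =>
    have hcont : d.contains key = false := (PySem.Dict.get?_eq_none_iff_contains d key).1 hd0
    have hrcont : r.contains key = false := by
      rw [PySem.Dict.contains_eq_isSome_get?, hget, hd0]; rfl
    have hgd : d.getD key [] = [] := PySem.Dict.getD_of_get?_eq_none d [] hd0
    have hb : bStep r f key = r.insert key (some f) := by
      rw [bStep, hget, hd0]
      rfl
    refine ⟨?_, ?_, ?_⟩
    · rw [hb, PySem.Dict.items_insert_of_not_contains r _ hrcont,
          PySem.Dict.items_insert_of_not_contains d _ hcont, hmap]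
      simp [mapRes, hgd, pyResolve_singleton]
    · rw [PySem.Dict.keys_insert_of_not_contains d _ hcont]
      have hk : key ∉ d.keys := fun hk => by
        simp [(PySem.Dict.contains_iff_mem_keys d key).2 hk] at hcont
      exact List.Nodup.append hnd (List.nodup_singleton _)
        (by simpa [List.disjoint_singleton] using hk)
    · intro p hp
      rw [PySem.Dict.items_insert_of_not_contains d _ hcont] at hp
      rcases List.mem_append.1 hp with h1 | h1
      · exact hne p h1
      · simp only [List.mem_singleton] at h1
        subst h1; simp [hgd]
  | some fs =>
    have hcont : d.contains key = true := by
      rw [PySem.Dict.contains_eq_isSome_get?, hd0]; rfl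
    have hrc : r.contains key = true := by
      rw [PySem.Dict.contains_eq_isSome_get?, hget, hd0]; rfl
    have hfs : fs ≠ [] := hne (key, fs) (PySem.Dict.mem_items_of_get?_eq_some d hd0)
    have hgd : d.getD key [] = fs := PySem.Dict.getD_of_get?_eq_some d [] hd0
    have hsnoc := pyResolve_snoc fs f hfs
    have hval : ∀ p ∈ d.items, p.1 = key → p.2 = fs := by
      rintro ⟨pk, pv⟩ hp hpk
      dsimp at hpk; subst hpk
      have := PySem.Dict.get?_of_mem_items d hp hnd
      rw [hd0] at this
      exact (Option.some.inj this).symm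
    have hnodup' : (d.insert key (d.getD key [] ++ [f])).keys.Nodup := by
      rw [PySem.Dict.keys_insert_of_contains d _ hcont]; exact hnd
    have hne' : ∀ p ∈ (d.insert key (d.getD key [] ++ [f])).items, p.2 ≠ [] := by
      intro p hp
      rw [PySem.Dict.items_insert_of_contains d _ hcont] at hp
      obtain ⟨q, hq, rfl⟩ := List.mem_map.1 hp
      split
      · simp [hgd]
      · exact hne q hq
    by_cases hc : pyResolve fs ≠ none ∧ pyResolve fs ≠ some f
    · have hb : bStep r f key = r.insert key none := by
        rw [bStep, hget, hd0]; simp [hc.1, hc.2]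
      refine ⟨?_, hnodup', hne'⟩
      rw [hb, PySem.Dict.items_insert_of_contains r _ hrc,
          PySem.Dict.items_insert_of_contains d _ hcont, hmap]
      simp only [mapRes, List.map_map]
      apply List.map_congr_left
      rintro ⟨pk, pv⟩ hp
      by_cases hpk : pk = key
      · subst hpk
        have hpv : pv = fs := hval (pk, pv) hp rfl
        subst hpv
        simp [Function.comp, hgd, hsnoc, hc]
      · simp [Function.comp, hpk]
    · have hb : bStep r f key = r := by
        rw [bStep, hget, hd0]
        simp [hc]
      refine ⟨?_, hnodup', hne'⟩
      rw [hb, hmap, PySem.Dict.items_insert_of_contains d _ hcont]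
      simp only [mapRes, List.map_map]
      apply (List.map_congr_left ?_).symm
      rintro ⟨pk, pv⟩ hp
      by_cases hpk : pk = key
      · subst hpk
        have hpv : pv = fs := hval (pk, pv) hp rfl
        subst hpv
        simp only [Function.comp]
        simp [hgd, hsnoc, hc]
      · simp [Function.comp, hpk]

theorem fold_keys_inv (ks : List String) (f : String)
    (d : PySem.Dict String (List String)) (r : PySem.Dict String (Option String)) (h : ABInv d r) :
    ABInv (ks.foldl (fun d key => d.insert key (d.getD key [] ++ [f])) d)
        (ks.foldl (fun r key => bStep r f key) r) := by
  induction ks generalizing d r with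
  | nil => exact h
  | cons k ks ih => exact ih _ _ (step_inv d r f k h)

theorem fold_files_inv (files : List String)
    (d : PySem.Dict String (List String)) (r : PySem.Dict String (Option String)) (h : ABInv d r) :
    ABInv (files.foldl (fun d f => (importKeys f).foldl (fun d key => d.insert key (d.getD key [] ++ [f])) d) d)
        (files.foldl (fun r f => (importKeys f).foldl (fun r key => bStep r f key) r) r) := by
  induction files generalizing d r with
  | nil => exact h
  | cons f files ih => exact ih _ _ (fold_keys_inv (importKeys f) f d r h)

-- ===== VERDICT (by name: the statement is the Claim_ definition above) =====
theorem build_import_resolution_map_py_spec : Claim_equal_build_import_resolution_map_py := by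
  intro source_files _
  unfold Spec_build_import_resolution_map_py
  unfold build_import_resolution_map_py build_import_resolution_map_py_alt
  have hinv := fold_files_inv source_files PySem.Dict.empty PySem.Dict.empty
    (by refine ⟨rfl, ?_, ?_⟩ <;> simp [PySem.Dict.empty, PySem.Dict.keys])
  set d := source_files.foldl (fun d f => (importKeys f).foldl (fun d key => d.insert key (d.getD key [] ++ [f])) d) PySem.Dict.empty with hd
  set r := source_files.foldl (fun r f => (importKeys f).foldl (fun r key => bStep r f key) r) PySem.Dict.empty with hr
  obtain ⟨hmap, hnd, -⟩ := hinv
  show (List.foldl (fun r kv => r.insert kv.1 (pyResolve kv.2)) PySem.Dict.empty d.items).items = r.items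
  have hfresh : ∀ a ∈ d.items, (PySem.Dict.empty : PySem.Dict String (Option String)).contains ((fun kv : String × List String => kv.1) a) = false :=
    fun a _ => PySem.Dict.contains_empty _
  have h := PySem.Dict.items_foldl_insert_fresh d.items (fun kv => kv.1)
    (fun kv => pyResolve kv.2) PySem.Dict.empty hfresh hnd
  rw [hmap]
  simpa [mapRes] using h
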